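-- pv_equiv track=rewrite | github.com/Defectoscopist/Stack_T3 | default/update_seed.py | assign_sex
-- ===== SOURCE A (Python) =====
-- def assign_sex(product_name, description):
--     name_lower = product_name.lower()
--     desc_lower = description.lower()
--
--     # Women-specific indicators
--     if any(x in name_lower for x in ['leggings', 'women', 'ladies', 'girls']):
--         return 'Sex.WOMEN'
--     if any(x in desc_lower for x in ['leggings', 'high-waist']):
--         return 'Sex.WOMEN'
--     if any(x in name_lower for x in ['bra', 'sports bra']):
--         return 'Sex.WOMEN'
--
--     # Kids indicators
--     if any(x in name_lower for x in ['kids', 'child', 'junior']):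
--         return 'Sex.KIDS'
--
--     # Men indicators
--     if any(x in name_lower for x in ['men', 'mens', 'boys']):
--         return 'Sex.MEN'
--
--     # Default to UNISEX
--     return 'Sex.UNISEX'
-- ===== SOURCE B (Python) =====
-- NAME_KEYWORDS = {
--     'leggings': 'Sex.WOMEN', 'women': 'Sex.WOMEN', 'ladies': 'Sex.WOMEN',
--     'girls': 'Sex.WOMEN', 'bra': 'Sex.WOMEN', 'sports bra': 'Sex.WOMEN',
--     'kids': 'Sex.KIDS', 'child': 'Sex.KIDS', 'junior': 'Sex.KIDS',
--     'men': 'Sex.MEN', 'mens': 'Sex.MEN', 'boys': 'Sex.MEN',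
-- }
-- DESC_KEYWORDS = {'leggings': 'Sex.WOMEN', 'high-waist': 'Sex.WOMEN'}
-- PRIORITY = ('Sex.WOMEN', 'Sex.KIDS', 'Sex.MEN')
--
--
-- def assign_sex(product_name, description):
--     # match-all-then-resolve: collect every matched category, return highest priority
--     name_lower = product_name.lower()
--     desc_lower = description.lower()
--     matched = {sex for kw, sex in NAME_KEYWORDS.items() if kw in name_lower}
--     matched |= {sex for kw, sex in DESC_KEYWORDS.items() if kw in desc_lower}
--     for sex in PRIORITY:
--         if sex in matched:
--             return sex
--     return 'Sex.UNISEX'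
-- ===== Notes on version B (the rewrite author's own statement) =====
-- stated objective: alternative
-- what changed: Instead of A's ordered first-match if-chain, B matches order-independently: it collects the set of ALL categories whose keyword dictionaries hit the name/description, then resolves by a fixed priority WOMEN > KIDS > MEN, defaulting to UNISEX.
import Mathlib
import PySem

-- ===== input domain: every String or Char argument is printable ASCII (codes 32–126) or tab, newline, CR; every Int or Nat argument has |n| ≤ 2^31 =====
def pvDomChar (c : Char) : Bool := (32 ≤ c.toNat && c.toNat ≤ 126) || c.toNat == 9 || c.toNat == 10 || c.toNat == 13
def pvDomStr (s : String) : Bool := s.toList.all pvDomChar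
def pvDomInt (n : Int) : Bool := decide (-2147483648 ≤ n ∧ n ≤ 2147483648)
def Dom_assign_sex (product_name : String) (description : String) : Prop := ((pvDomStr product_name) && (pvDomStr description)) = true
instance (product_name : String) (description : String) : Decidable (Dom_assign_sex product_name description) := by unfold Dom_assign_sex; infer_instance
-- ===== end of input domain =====

-- B replaces A's ordered first-match if-chain by order-independent matching: collect ALL matched categories into a set, then resolve by fixed priority (objective: alternative).


-- ===== PORT A =====
def assign_sex (product_name : String) (description : String) : String :=
  let name_lower := PySem.Str.lower product_name
  let desc_lower := PySem.Str.lower description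
  if ["leggings", "women", "ladies", "girls"].any (fun x => PySem.Str.isIn x name_lower) then "Sex.WOMEN"
  else if ["leggings", "high-waist"].any (fun x => PySem.Str.isIn x desc_lower) then "Sex.WOMEN"
  else if ["bra", "sports bra"].any (fun x => PySem.Str.isIn x name_lower) then "Sex.WOMEN"
  else if ["kids", "child", "junior"].any (fun x => PySem.Str.isIn x name_lower) then "Sex.KIDS"
  else if ["men", "mens", "boys"].any (fun x => PySem.Str.isIn x name_lower) then "Sex.MEN"
  else "Sex.UNISEX"

-- ===== PORT B =====
-- keyword → category maps (the NAME_KEYWORDS / DESC_KEYWORDS dicts of Source B) and the fixed priority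
def nameKeywords : List (String × String) :=
  [ ("leggings", "Sex.WOMEN"), ("women", "Sex.WOMEN"), ("ladies", "Sex.WOMEN"),
    ("girls", "Sex.WOMEN"), ("bra", "Sex.WOMEN"), ("sports bra", "Sex.WOMEN"),
    ("kids", "Sex.KIDS"), ("child", "Sex.KIDS"), ("junior", "Sex.KIDS"),
    ("men", "Sex.MEN"), ("mens", "Sex.MEN"), ("boys", "Sex.MEN") ]
def descKeywords : List (String × String) :=
  [ ("leggings", "Sex.WOMEN"), ("high-waist", "Sex.WOMEN") ]
def sexPriority : List String := ["Sex.WOMEN", "Sex.KIDS", "Sex.MEN"]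

-- matched = {sex for kw, sex in NAME_KEYWORDS.items() if kw in name_lower}
--         | {sex for kw, sex in DESC_KEYWORDS.items() if kw in desc_lower}
def matchedSet (name_lower desc_lower : String) : PySem.Set String :=
  PySem.Set.union
    (PySem.Set.ofList ((nameKeywords.filter (fun p => PySem.Str.isIn p.1 name_lower)).map Prod.snd))
    ((descKeywords.filter (fun p => PySem.Str.isIn p.1 desc_lower)).map Prod.snd)

def assign_sex_alt (product_name : String) (description : String) : String :=
  let name_lower := PySem.Str.lower product_name
  let desc_lower := PySem.Str.lower description
  let matched := matchedSet name_lower desc_lower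
  -- for sex in PRIORITY: if sex in matched: return sex / else UNISEX
  match sexPriority.find? (fun s => PySem.Set.contains matched s) with
  | some s => s
  | none => "Sex.UNISEX"

-- ===== PRECONDITION & SPEC =====
def Spec_assign_sex (product_name : String) (description : String) (out : String) : Prop := out = assign_sex_alt product_name description
instance (product_name : String) (description : String) (out : String) : Decidable (Spec_assign_sex product_name description out) := by unfold Spec_assign_sex; infer_instance

-- ===== CLAIM (what is proved, stated in full; the proofs are below) =====
def Claim_equal_assign_sex : Prop := ∀ (product_name : String) (description : String), Dom_assign_sex product_name description → Spec_assign_sex product_name description (assign_sex product_name description)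

-- ===== LEMMAS AND PROOFS =====
-- which categories the matched set contains, as disjunctions of the atomic substring tests
theorem memW (nl dl : String) :
    ("Sex.WOMEN" ∈ matchedSet nl dl) ↔
      (PySem.Str.isIn "leggings" nl = true ∨ PySem.Str.isIn "women" nl = true ∨
       PySem.Str.isIn "ladies" nl = true ∨ PySem.Str.isIn "girls" nl = true ∨
       PySem.Str.isIn "leggings" dl = true ∨ PySem.Str.isIn "high-waist" dl = true ∨
       PySem.Str.isIn "bra" nl = true ∨ PySem.Str.isIn "sports bra" nl = true) := by
  simp [matchedSet, PySem.Set.mem_union, PySem.Set.mem_ofList, List.mem_map,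
    List.mem_filter, nameKeywords, descKeywords]
  tauto

theorem memK (nl dl : String) :
    ("Sex.KIDS" ∈ matchedSet nl dl) ↔
      (PySem.Str.isIn "kids" nl = true ∨ PySem.Str.isIn "child" nl = true ∨
       PySem.Str.isIn "junior" nl = true) := by
  simp [matchedSet, PySem.Set.mem_union, PySem.Set.mem_ofList, List.mem_map,
    List.mem_filter, nameKeywords, descKeywords]

theorem memM (nl dl : String) :
    ("Sex.MEN" ∈ matchedSet nl dl) ↔
      (PySem.Str.isIn "men" nl = true ∨ PySem.Str.isIn "mens" nl = true ∨
       PySem.Str.isIn "boys" nl = true) := by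
  simp [matchedSet, PySem.Set.mem_union, PySem.Set.mem_ofList, List.mem_map,
    List.mem_filter, nameKeywords, descKeywords]

-- merging consecutive ifs that return the same value
theorem ite_ite_same {α : Type} {c d : Prop} [Decidable c] [Decidable d] (x y : α) :
    (if c then x else if d then x else y) = if c ∨ d then x else y := by
  split_ifs <;> tauto

-- the two bodies agree for every pair of lowered strings
theorem key (nl dl : String) :
    (if ["leggings", "women", "ladies", "girls"].any (fun x => PySem.Str.isIn x nl) then "Sex.WOMEN"
     else if ["leggings", "high-waist"].any (fun x => PySem.Str.isIn x dl) then "Sex.WOMEN"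
     else if ["bra", "sports bra"].any (fun x => PySem.Str.isIn x nl) then "Sex.WOMEN"
     else if ["kids", "child", "junior"].any (fun x => PySem.Str.isIn x nl) then "Sex.KIDS"
     else if ["men", "mens", "boys"].any (fun x => PySem.Str.isIn x nl) then "Sex.MEN"
     else "Sex.UNISEX")
    = (match sexPriority.find? (fun s => PySem.Set.contains (matchedSet nl dl) s) with
       | some s => s
       | none => "Sex.UNISEX") := by
  simp only [sexPriority, List.find?_cons, List.find?_nil,
    PySem.Set.contains_eq_listContains, List.contains_eq_mem, memW, memK, memM]
  simp only [List.any_cons, List.any_nil, Bool.or_false, Bool.or_eq_true,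
    ite_ite_same, or_assoc]
  by_cases hw : (PySem.Str.isIn "leggings" nl = true ∨ PySem.Str.isIn "women" nl = true ∨
      PySem.Str.isIn "ladies" nl = true ∨ PySem.Str.isIn "girls" nl = true ∨
      PySem.Str.isIn "leggings" dl = true ∨ PySem.Str.isIn "high-waist" dl = true ∨
      PySem.Str.isIn "bra" nl = true ∨ PySem.Str.isIn "sports bra" nl = true) <;>
    by_cases hk : (PySem.Str.isIn "kids" nl = true ∨ PySem.Str.isIn "child" nl = true ∨
        PySem.Str.isIn "junior" nl = true) <;>
      by_cases hm : (PySem.Str.isIn "men" nl = true ∨ PySem.Str.isIn "mens" nl = true ∨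
          PySem.Str.isIn "boys" nl = true) <;>
        simp only [hw, hk, hm, decide_true, decide_false, if_true, if_false]

-- ===== VERDICT (by name: the statement is the Claim_ definition above) =====
theorem assign_sex_spec : Claim_equal_assign_sex := by
  intro product_name description _
  unfold Spec_assign_sex assign_sex assign_sex_alt
  exact key (PySem.Str.lower product_name) (PySem.Str.lower description)
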